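-- pv_equiv track=rewrite | github.com/galnadjar/sedInPy | main.py | lastSubStrInd
-- ===== SOURCE A (Python) =====
-- def lastSubStrInd(userInput):
--     """
--     find the starting index of the last occurrence of a substring
--     :param userInput: the input from the user
--     :return:the starting index as mentioned above
--     """
--
--     i = len(userInput) - 1
--     wordStarted = False
--     while i >= 0:
--
--         if userInput[i].isspace(): #if the current word is space
--             if wordStarted: #if atleast 1 letter was already called it means previously we had a start of a last substr
--                 return i+1
--
--         else: #a word which is a space was read
--             wordStarted = True
--
--         i-= 1
--
--     return 0 #if the entire string is smooshed together
-- ===== SOURCE B (Python) =====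
-- def lastSubStrInd(userInput):
--     # Single forward pass tracking the start index of the current word;
--     # the final value of `start` is the start of the last word (0 if none).
--     start = 0
--     inWord = False
--     for i, ch in enumerate(userInput):
--         if ch.isspace():
--             inWord = False
--         elif not inWord:
--             inWord = True
--             start = i
--     return start
-- ===== Notes on version B (the rewrite author's own statement) =====
-- stated objective: alternative
-- what changed: Replaces A's reverse index-loop with a wordStarted flag and early return by a single forward enumerate pass that records the start index of each word as it begins and returns the last one recorded.
import Mathlib
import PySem

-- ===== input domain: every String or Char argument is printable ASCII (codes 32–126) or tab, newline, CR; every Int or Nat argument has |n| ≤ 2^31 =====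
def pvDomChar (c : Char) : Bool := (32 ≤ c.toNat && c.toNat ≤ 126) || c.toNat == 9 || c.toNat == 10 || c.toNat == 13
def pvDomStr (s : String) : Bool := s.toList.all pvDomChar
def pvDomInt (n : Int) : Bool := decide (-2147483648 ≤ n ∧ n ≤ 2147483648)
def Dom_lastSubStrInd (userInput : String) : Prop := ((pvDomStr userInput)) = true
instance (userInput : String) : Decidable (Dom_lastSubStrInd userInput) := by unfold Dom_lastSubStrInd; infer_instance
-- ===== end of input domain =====

-- B replaces A's reverse scan (wordStarted flag, early return) by a forward pass that
-- records the start index of each word as it begins and returns the last one (objective: alternative).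

-- ===== PORT A =====
-- A's while loop, i from len-1 down to 0; here `i` counts how many indices remain,
-- the current Python index is i-1 (loop exits when Python's i < 0, i.e. here i = 0).
def pvALoop (cs : List Char) : Nat → Bool → Int
  | 0, _ => 0
  | Nat.succ j, wordStarted =>
    if PySem.Chars.isspace (cs.getD j ' ') then   -- userInput[i].isspace(); index always in range
      if wordStarted then ((j : Int) + 1)
      else pvALoop cs j wordStarted
    else pvALoop cs j true

def lastSubStrInd (userInput : String) : Int :=
  pvALoop userInput.toList userInput.toList.length false

-- ===== PORT B =====
-- loop body of B: state (start, inWord), one enumerate item (i, ch)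
def pvBStep (st : Int × Bool) (p : Int × Char) : Int × Bool :=
  if PySem.Chars.isspace p.2 then (st.1, false)
  else if st.2 then st
  else (p.1, true)

def lastSubStrInd_alt (userInput : String) : Int :=
  ((PySem.List.enumerate userInput.toList 0).foldl pvBStep ((0 : Int), false)).1

-- ===== PRECONDITION & SPEC =====
def Spec_lastSubStrInd (userInput : String) (out : Int) : Prop := out = lastSubStrInd_alt userInput
instance (userInput : String) (out : Int) : Decidable (Spec_lastSubStrInd userInput out) := by unfold Spec_lastSubStrInd; infer_instance

-- ===== CLAIM (what is proved, stated in full; the proofs are below) =====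
def Claim_equal_lastSubStrInd : Prop := ∀ (userInput : String), Dom_lastSubStrInd userInput → Spec_lastSubStrInd userInput (lastSubStrInd userInput)

-- ===== LEMMAS AND PROOFS =====

-- B's fold state after a list of chars
def pvF (cs : List Char) : Int × Bool :=
  (PySem.List.enumerate cs 0).foldl pvBStep ((0 : Int), false)

-- "one past the last space index" (0 if no space): closed form for pvALoop … true
def pvW (cs : List Char) : Int :=
  (PySem.List.enumerate cs 0).foldl
    (fun a p => if PySem.Chars.isspace p.2 then p.1 + 1 else a) (0 : Int)

-- pvALoop only reads indices < j, so appending a char does not change it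
theorem pvALoop_append (cs : List Char) (c : Char) :
    ∀ (j : Nat), j ≤ cs.length → ∀ (ws : Bool),
    pvALoop (cs ++ [c]) j ws = pvALoop cs j ws := by
  intro j
  induction j with
  | zero => intro _ ws; simp [pvALoop]
  | succ k ih =>
    intro hk ws
    have hlt : k < cs.length := hk
    have hg : (cs ++ [c]).getD k ' ' = cs.getD k ' ' := by
      simp [List.getD, List.getElem?_append_left hlt]
    simp only [pvALoop, hg]
    rw [ih (Nat.le_of_lt hlt), ih (Nat.le_of_lt hlt)]

theorem pvMain (cs : List Char) :
    pvALoop cs cs.length true = pvW cs ∧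
    pvALoop cs cs.length false = (pvF cs).1 ∧
    ((pvF cs).2 = true → (pvF cs).1 = pvW cs) ∧
    ((pvF cs).2 = false → pvW cs = (cs.length : Int)) := by
  induction cs using List.reverseRecOn with
  | nil => simp [pvALoop, pvF, pvW, PySem.List.enumerate]
  | append_singleton cs c ih =>
    obtain ⟨ih1, ih2, ih3, ih4⟩ := ih
    have hen : PySem.List.enumerate (cs ++ [c]) 0
        = PySem.List.enumerate cs 0 ++ [((cs.length : Int), c)] := by
      simpa using PySem.List.enumerate_append cs [c] 0
    have hF : pvF (cs ++ [c]) = pvBStep (pvF cs) ((cs.length : Int), c) := by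
      simp [pvF, hen]
    have hW : pvW (cs ++ [c])
        = if PySem.Chars.isspace c then (cs.length : Int) + 1 else pvW cs := by
      simp [pvW, hen]
    have hlen : (cs ++ [c]).length = cs.length + 1 := by simp
    have hg : (cs ++ [c]).getD cs.length ' ' = c := by
      simp [List.getD]
    have hstep : ∀ ws, pvALoop (cs ++ [c]) (cs.length + 1) ws
        = if PySem.Chars.isspace c then
            (if ws then ((cs.length : Int) + 1) else pvALoop cs cs.length ws)
          else pvALoop cs cs.length true := by
      intro ws
      simp only [pvALoop, hg]
      by_cases hs : PySem.Chars.isspace c <;>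
        simp [hs, pvALoop_append cs c cs.length le_rfl]
    refine ⟨?_, ?_, ?_, ?_⟩
    · rw [hlen, hstep, hW]
      by_cases hs : PySem.Chars.isspace c = true
      · simp [hs]
      · rw [Bool.not_eq_true] at hs; simp [hs, ih1]
    · rw [hlen, hstep, hF]
      by_cases hs : PySem.Chars.isspace c = true
      · simp [pvBStep, hs, ih2]
      · rw [Bool.not_eq_true] at hs
        by_cases hw : (pvF cs).2 = true
        · simp [pvBStep, hs, hw, ih1, ih3 hw]
        · rw [Bool.not_eq_true] at hw
          simp [pvBStep, hs, hw, ih1, ih4 hw]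
    · rw [hF, hW]
      by_cases hs : PySem.Chars.isspace c = true
      · simp [pvBStep, hs]
      · rw [Bool.not_eq_true] at hs
        by_cases hw : (pvF cs).2 = true
        · simp [pvBStep, hs, hw, ih3 hw]
        · rw [Bool.not_eq_true] at hw
          simp [pvBStep, hs, hw, ih4 hw]
    · rw [hF, hW]
      by_cases hs : PySem.Chars.isspace c = true
      · simp [pvBStep, hs, hlen]
      · rw [Bool.not_eq_true] at hs
        by_cases hw : (pvF cs).2 = true <;>
          first
          | (rw [Bool.not_eq_true] at hw; simp [pvBStep, hs, hw])
          | simp [pvBStep, hs, hw]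
-- ===== VERDICT (by name: the statement is the Claim_ definition above) =====
theorem lastSubStrInd_spec : Claim_equal_lastSubStrInd := by
  intro s _
  unfold Spec_lastSubStrInd lastSubStrInd lastSubStrInd_alt
  exact (pvMain s.toList).2.1
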